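-- pv_equiv track=rewrite | github.com/nikitaahuja9/Text-Classification | LogisticRegression.py | featureList
-- ===== SOURCE A (Python) =====
-- def featureList(words, dic1):
--     w = list(words)
--     result = []
--     for f in dic1:
--         row = [0] * (len(w))
--         for word in w:
--             if word in dic1[f]:
--                 row[w.index(word)] = 1
--         # x0 = 1, so insert it first
--         row.insert(0,1)
--         result.append(row)
--     return result
-- ===== SOURCE B (Python) =====
-- def featureList(words, dic1):
--     # Build a first-occurrence index table once, then fill each row by
--     # iterating over the dictionary entry's own members instead of
--     # scanning the word list with .index for every word.
--     pos = {}
--     for i, word in enumerate(words):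
--         pos.setdefault(word, i)
--     result = []
--     for members in dic1.values():
--         row = [0] * (len(words) + 1)
--         row[0] = 1  # x0 = 1
--         for element in members:
--             if element in pos:
--                 row[pos[element] + 1] = 1
--         result.append(row)
--     return result
-- ===== Notes on version B (the rewrite author's own statement) =====
-- stated objective: faster
-- what changed: Instead of scanning the whole word list for every dictionary entry and calling w.index(word) (a linear scan) per hit, B builds a first-occurrence index dict once and then iterates only over each entry's own members, writing directly into a pre-sized row.
import Mathlib
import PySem

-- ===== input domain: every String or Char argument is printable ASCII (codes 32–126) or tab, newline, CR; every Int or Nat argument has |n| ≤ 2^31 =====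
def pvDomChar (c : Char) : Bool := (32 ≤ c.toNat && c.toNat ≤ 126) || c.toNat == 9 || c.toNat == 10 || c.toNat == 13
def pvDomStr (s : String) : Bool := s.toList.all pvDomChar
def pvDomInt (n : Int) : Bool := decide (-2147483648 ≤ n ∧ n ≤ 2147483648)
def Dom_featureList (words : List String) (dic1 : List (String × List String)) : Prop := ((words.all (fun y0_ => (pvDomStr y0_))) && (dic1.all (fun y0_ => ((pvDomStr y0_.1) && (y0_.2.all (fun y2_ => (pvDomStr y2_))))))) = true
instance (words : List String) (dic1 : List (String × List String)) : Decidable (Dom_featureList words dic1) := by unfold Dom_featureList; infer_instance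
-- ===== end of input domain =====

-- B builds a first-occurrence index table once and fills each row from the dictionary
-- entry's own members, instead of A's per-entry scan of the word list with .index (faster).

-- ===== PORT A =====
def featureList (words : List String) (dic1 : List (String × List String)) : List (List Int) :=
  let w := words
  dic1.foldl (fun result f =>
    -- dic1[f]: first-match association-list lookup (dict convention); f is a key of dic1
    let vals := ((PySem.Dict.mk dic1).get? f.1).getD []
    let row := w.foldl (fun row word =>
      if vals.contains word then
        match PySem.List.index? w word with
        | some i => row.set i 1        -- row[w.index(word)] = 1 (word ∈ w, so index? is some)
        | none => row
      else row) (List.replicate w.length (0 : Int))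
    result ++ [PySem.List.insert row 0 1]) []

-- ===== PORT B =====
def featureList_alt (words : List String) (dic1 : List (String × List String)) : List (List Int) :=
  let pos := (PySem.List.enumerate words 0).foldl
    (fun d p => d.setdefault p.2 p.1) (PySem.Dict.empty : PySem.Dict String Int)
  dic1.foldl (fun result f =>
    let row0 := PySem.List.pySetD (List.replicate (words.length + 1) (0 : Int)) 0 1
    let row := f.2.foldl (fun row e =>
      match pos.get? e with
      | some i => PySem.List.pySetD row (i + 1) 1   -- row[pos[element] + 1] = 1
      | none => row) row0
    result ++ [row]) []

-- ===== PRECONDITION & SPEC =====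
-- Pre_ excludes association lists with duplicate keys: they represent no Python dict
-- (a dict overwrites duplicates in place), so A's first-match/twice-iterated behaviour
-- there is an accident of the representation.
def Pre_featureList (words : List String) (dic1 : List (String × List String)) : Prop :=
  (dic1.map Prod.fst).Nodup
instance (words : List String) (dic1 : List (String × List String)) : Decidable (Pre_featureList words dic1) := by unfold Pre_featureList; infer_instance

def pvWitness_featureList : List String × (List (String × List String)) :=
  (["a", "b"], [("f", ["a"]), ("g", ["b", "c"])])

def Spec_featureList (words : List String) (dic1 : List (String × List String)) (out : List (List Int)) : Prop := out = featureList_alt words dic1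
instance (words : List String) (dic1 : List (String × List String)) (out : List (List Int)) : Decidable (Spec_featureList words dic1 out) := by unfold Spec_featureList; infer_instance

-- ===== CLAIM (what is proved, stated in full; the proofs are below) =====
def Claim_equal_featureList : Prop := ∀ (words : List String) (dic1 : List (String × List String)), Dom_featureList words dic1 → Pre_featureList words dic1 → Spec_featureList words dic1 (featureList words dic1)

-- ===== LEMMAS AND PROOFS =====

-- an append-accumulate loop is a map
theorem pvFoldlAppend {α β : Type} (l : List α) (h : α → β) (init : List β) :
    l.foldl (fun acc x => acc ++ [h x]) init = init ++ l.map h := by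
  induction l generalizing init with
  | nil => simp
  | cons a l ih => simp [ih]

-- A's dict lookup of a pair's own key returns that pair's value when keys are distinct
theorem pvLookupSelf {ν : Type} (l : List (String × ν)) (hnd : (l.map Prod.fst).Nodup)
    (f : String × ν) (hf : f ∈ l) : (PySem.Dict.mk l).get? f.1 = some f.2 := by
  induction l with
  | nil => cases hf
  | cons a l ih =>
    simp only [List.map_cons, List.nodup_cons] at hnd
    rcases List.mem_cons.mp hf with rfl | hf
    · rw [PySem.Dict.get?_mk_cons]; simp
    · rw [PySem.Dict.get?_mk_cons]
      have hne : a.1 ≠ f.1 := by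
        intro h; exact hnd.1 (h ▸ List.mem_map_of_mem hf)
      simp only [beq_iff_eq, if_neg hne]
      exact ih hnd.2 hf

-- characterization of B's pos dict: first-occurrence index
theorem pvPosChar (ws : List String) (s : Int) (d : PySem.Dict String Int) (x : String) :
    ((PySem.List.enumerate ws s).foldl (fun d p => d.setdefault p.2 p.1) d).get? x =
      (match d.get? x with
       | some v => some v
       | none => (PySem.List.index? ws x).map (fun n => (n : Int) + s)) := by
  induction ws generalizing s d with
  | nil =>
    rw [PySem.List.enumerate_nil, List.foldl_nil,
      (PySem.List.index?_eq_none_iff ([] : List String) x).mpr (by simp)]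
    cases h : d.get? x <;> simp [h]
  | cons w ws ih =>
    rw [PySem.List.enumerate_cons, List.foldl_cons,
      show ((s, w)).2 = w from rfl, show ((s, w)).1 = s from rfl, ih]
    by_cases hx : x = w
    · subst hx
      rw [PySem.Dict.get?_setdefault_self d x s, PySem.List.index?_cons_self]
      cases h : d.get? x <;> simp [h]
    · rw [PySem.Dict.get?_setdefault_of_ne d s hx,
        PySem.List.index?_cons_of_ne ws (Ne.symm hx)]
      cases h : d.get? x
      · simp only [h]
        cases hi : PySem.List.index? ws x <;> simp [hi] <;> push_cast <;> ring
      · simp [h]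

-- a fold that sets index g x to 1 whenever g x is some: pointwise value
theorem pvSetFoldChar {α : Type} (l : List α) (g : α → Option Nat) (init : List Int) (j : Nat) :
    (l.foldl (fun row x => match g x with | some i => row.set i 1 | none => row) init)[j]? =
      if (∃ x ∈ l, g x = some j) ∧ j < init.length then some (1 : Int) else init[j]? := by
  induction l generalizing init with
  | nil => simp
  | cons a l ih =>
    rw [List.foldl_cons]
    cases hga : g a with
    | none =>
      simp only [hga]
      rw [ih]
      by_cases hC : (∃ x ∈ l, g x = some j) ∧ j < init.length
      · rw [if_pos hC,
          if_pos ⟨⟨hC.1.choose, List.mem_cons_of_mem a hC.1.choose_spec.1, hC.1.choose_spec.2⟩, hC.2⟩]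
      · rw [if_neg hC, if_neg]
        rintro ⟨⟨x, hx, hgx⟩, hj⟩
        rcases List.mem_cons.mp hx with rfl | hx
        · rw [hga] at hgx; cases hgx
        · exact hC ⟨⟨x, hx, hgx⟩, hj⟩
    | some i =>
      simp only [hga]
      rw [ih]
      simp only [List.length_set, List.getElem?_set]
      by_cases hij : i = j
      · subst hij
        by_cases hi : i < init.length
        · by_cases hC : ∃ x ∈ l, g x = some i
          · rw [if_pos ⟨hC, hi⟩,
              if_pos ⟨⟨hC.choose, List.mem_cons_of_mem a hC.choose_spec.1, hC.choose_spec.2⟩, hi⟩]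
          · have hL : ¬((∃ x ∈ l, g x = some i) ∧ i < init.length) := fun h => hC h.1
            rw [if_neg hL, if_pos rfl, if_pos hi,
              if_pos ⟨⟨a, List.mem_cons_self, hga⟩, hi⟩]
        · have hL : ¬((∃ x ∈ l, g x = some i) ∧ i < init.length) := fun h => hi h.2
          have hR : ¬((∃ x ∈ a :: l, g x = some i) ∧ i < init.length) := fun h => hi h.2
          rw [if_neg hL, if_neg hR, if_pos rfl, if_neg hi, List.getElem?_eq_none (by omega)]
      · rw [if_neg hij]
        by_cases hC : (∃ x ∈ l, g x = some j) ∧ j < init.length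
        · rw [if_pos hC,
            if_pos ⟨⟨hC.1.choose, List.mem_cons_of_mem a hC.1.choose_spec.1, hC.1.choose_spec.2⟩, hC.2⟩]
        · rw [if_neg hC, if_neg]
          rintro ⟨⟨x, hx, hgx⟩, hj⟩
          rcases List.mem_cons.mp hx with rfl | hx
          · rw [hga] at hgx
            exact hij (by simpa using hgx)
          · exact hC ⟨⟨x, hx, hgx⟩, hj⟩

-- the two row computations agree for one dictionary entry
theorem pvRowEq (words : List String) (vals : List String) :
    PySem.List.insert
      (words.foldl (fun (row : List Int) word =>
        if vals.contains word then
          match PySem.List.index? words word with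
          | some i => row.set i 1
          | none => row
        else row) (List.replicate words.length (0 : Int))) 0 1 =
    vals.foldl (fun (row : List Int) e =>
      match (PySem.List.index? words e).map (fun n => (n : Int)) with
      | some i => PySem.List.pySetD row (i + 1) 1
      | none => row) (PySem.List.pySetD (List.replicate (words.length + 1) (0 : Int)) 0 1) := by
  have hA : (words.foldl (fun (row : List Int) word =>
        if vals.contains word then
          match PySem.List.index? words word with
          | some i => row.set i 1
          | none => row
        else row) (List.replicate words.length (0 : Int))) =
      (words.foldl (fun (row : List Int) word =>
        match (if vals.contains word then PySem.List.index? words word else none) with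
        | some i => row.set i 1
        | none => row) (List.replicate words.length (0 : Int))) := by
    congr 1
    funext row word
    by_cases h : vals.contains word
    · simp only [if_pos h]
    · simp only [if_neg h]
  have hB : (vals.foldl (fun (row : List Int) e =>
      match (PySem.List.index? words e).map (fun n => (n : Int)) with
      | some i => PySem.List.pySetD row (i + 1) 1
      | none => row) (PySem.List.pySetD (List.replicate (words.length + 1) (0 : Int)) 0 1)) =
      (vals.foldl (fun (row : List Int) e =>
        match (PySem.List.index? words e).map (fun n => n + 1) with
        | some i => row.set i 1
        | none => row) ((List.replicate (words.length + 1) (0 : Int)).set 0 1)) := by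
    rw [show ((0 : Int)) = ((0 : Nat) : Int) from rfl, PySem.List.pySetD_natCast]
    congr 1
    funext row e
    cases h : PySem.List.index? words e with
    | none => simp [h]
    | some n =>
      simp [h]
      have hc : ((n : Int) + 1) = ((n + 1 : Nat) : Int) := by push_cast; ring
      rw [hc, PySem.List.pySetD_natCast]
  rw [hA, hB, PySem.List.insert_zero]
  have hinit : (List.replicate (words.length + 1) (0 : Int)).set 0 1 =
      (1 : Int) :: List.replicate words.length 0 := by
    rw [List.replicate_succ]; rfl
  rw [hinit]
  apply List.ext_getElem?
  intro j
  cases j with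
  | zero =>
    rw [pvSetFoldChar, if_neg]
    · rfl
    · rintro ⟨⟨e, _, hge⟩, _⟩
      cases h : PySem.List.index? words e <;> rw [h] at hge <;> simp at hge
  | succ k =>
    rw [List.getElem?_cons_succ, pvSetFoldChar, pvSetFoldChar]
    simp only [List.length_replicate, List.length_cons]
    have hcond : ((∃ x ∈ words, (if vals.contains x then PySem.List.index? words x else none) = some k) ∧ k < words.length) ↔
        ((∃ x ∈ vals, (PySem.List.index? words x).map (fun n => n + 1) = some (k + 1)) ∧ k + 1 < words.length + 1) := by
      constructor
      · rintro ⟨⟨x, hx, hgx⟩, hk⟩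
        by_cases hc : vals.contains x
        · rw [if_pos hc] at hgx
          exact ⟨⟨x, by simpa using hc, by rw [hgx]; rfl⟩, by omega⟩
        · rw [if_neg hc] at hgx; cases hgx
      · rintro ⟨⟨x, hx, hgx⟩, hk⟩
        cases hix : PySem.List.index? words x with
        | none => rw [hix] at hgx; cases hgx
        | some n =>
          rw [hix] at hgx
          simp only [Option.map_some, Option.some.injEq] at hgx
          have hn : n = k := by omega
          subst hn
          have hmem : x ∈ words := by
            rw [← PySem.List.index?_isSome_iff (xs := words) (v := x), hix]; rfl
          refine ⟨⟨x, hmem, ?_⟩, by omega⟩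
          rw [if_pos (by simpa using hx), hix]
    by_cases hC : (∃ x ∈ words, (if vals.contains x then PySem.List.index? words x else none) = some k) ∧ k < words.length
    · rw [if_pos hC, if_pos (hcond.mp hC)]
    · rw [if_neg hC, if_neg (fun h => hC (hcond.mpr h)), List.getElem?_cons_succ]

-- ===== VERDICT (by name: the statement is the Claim_ definition above) =====
theorem featureList_spec : Claim_equal_featureList := by
  intro words dic1 _hDom hPre
  unfold Spec_featureList featureList featureList_alt
  rw [pvFoldlAppend, pvFoldlAppend, List.nil_append, List.nil_append]
  apply List.map_congr_left
  intro f hf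
  rw [pvLookupSelf dic1 hPre f hf]
  have hpos : ∀ e : String, ((PySem.List.enumerate words 0).foldl
      (fun d p => d.setdefault p.2 p.1) (PySem.Dict.empty : PySem.Dict String Int)).get? e =
      (PySem.List.index? words e).map (fun n => (n : Int)) := by
    intro e
    rw [pvPosChar]
    simp [PySem.Dict.get?_empty]
  have hfun : (fun (row : List Int) (e : String) =>
      match ((PySem.List.enumerate words 0).foldl
        (fun d p => d.setdefault p.2 p.1) (PySem.Dict.empty : PySem.Dict String Int)).get? e with
      | some i => PySem.List.pySetD row (i + 1) 1
      | none => row) =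
      (fun (row : List Int) (e : String) =>
      match (PySem.List.index? words e).map (fun n => (n : Int)) with
      | some i => PySem.List.pySetD row (i + 1) 1
      | none => row) := by
    funext row e
    rw [hpos e]
  simp only [Option.getD_some]
  rw [hfun]
  exact pvRowEq words f.2
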